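-- pv_equiv track=rewrite | github.com/velbiy/tasks | module_3_5.py | get_multiplied_digits
-- ===== SOURCE A (Python) =====
-- def get_multiplied_digits(number):
--     str_number = str(number)
--     first = int(str_number[0])
--     if len(str_number) > 1:
--         return first * get_multiplied_digits(int(str_number[1:]))
--     else:
--        if int(str_number) != 0:
--            return int(str_number)
--        else:
--            return 1
-- ===== SOURCE B (Python) =====
-- def get_multiplied_digits(number):
--     result = 1
--     n = number
--     while n > 0:
--         n, d = divmod(n, 10)
--         if d:
--             result *= d
--     return result
-- ===== Notes on version B (the rewrite author's own statement) =====
-- stated objective: alternative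
-- what changed: Replaces A's recursion over str(number) (slicing and re-parsing int(str(n)[1:]) at every level) with a pure arithmetic divmod loop that never touches strings: repeatedly split off the last digit with divmod(n, 10) and multiply in each non-zero digit.
import Mathlib
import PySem

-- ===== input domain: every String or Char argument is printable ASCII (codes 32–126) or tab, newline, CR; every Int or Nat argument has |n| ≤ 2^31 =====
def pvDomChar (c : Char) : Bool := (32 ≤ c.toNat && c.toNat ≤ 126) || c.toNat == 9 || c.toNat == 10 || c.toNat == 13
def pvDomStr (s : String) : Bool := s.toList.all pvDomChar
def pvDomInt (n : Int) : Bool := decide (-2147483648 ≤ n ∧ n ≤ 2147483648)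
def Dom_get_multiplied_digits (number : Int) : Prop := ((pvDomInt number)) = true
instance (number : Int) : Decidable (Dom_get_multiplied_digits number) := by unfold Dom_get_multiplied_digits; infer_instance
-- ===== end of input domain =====

-- B changes: a pure arithmetic divmod loop (split off the last digit with divmod(n, 10), multiply
-- in each non-zero digit) instead of A's recursion over str(number) that slices and re-parses
-- int(str(n)[1:]) at every level (objective: alternative — no string conversions at all).
-- Python's int() in A is ported BY HAND below (pvInt?): PySem.Int.ofStr? hides its digit loop in a
-- private definition the Lean elaborator can never unfold, so nothing could be proved about it on a
-- variable string.  pvInt? is exact = int(s) on every string made of an optional sign followed by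
-- decimal digits — which is all that str(number) and its slices (the only strings A passes to
-- int()) can produce; like int() it returns none (= ValueError) on '-', '' and any string
-- containing a non-digit.

-- value of a string of decimal digit characters, as Python's int() digit loop computes it
def pvVal (ds : List Char) : Nat := ds.foldl (fun a c => 10 * a + (c.toNat - '0'.toNat)) 0

-- int(s) for s = [optional sign] ++ digits : hand port of Python int(), exact on such strings
def pvDigits? (ds : List Char) : Option Nat :=
  if ds ≠ [] ∧ ds.all Char.isDigit then some (pvVal ds) else none

def pvInt? (cs : List Char) : Option Int :=
  match cs with
  | [] => none
  | c :: ds =>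
    if c = '-' then (pvDigits? ds).map (fun v => -(v : Int))
    else if c = '+' then (pvDigits? ds).map (fun v => (v : Int))
    else (pvDigits? cs).map (fun v => (v : Int))

-- ===== PORT A =====
def get_multiplied_digits (number : Int) : Int :=
  let str_number := PySem.Int.toChars number        -- str_number = str(number)   (as its list of characters)
  match PySem.Chars.pyGet? str_number 0 with        -- str_number[0] (IndexError impossible: str(n) ≠ '')
  | none => 0
  | some c0 =>
  match pvInt? [c0] with                            -- first = int(str_number[0]); ValueError ('-') outside Pre_
  | none => 0
  | some first =>
  if PySem.Chars.len str_number > 1 then            -- len(str_number) > 1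
    match pvInt? (PySem.Chars.slice str_number (some 1) none) with  -- int(str_number[1:])
    | none => 0
    | some m =>
      -- guard for termination only: the parsed tail of a nonnegative number is smaller
      if _h : m.toNat < number.toNat then first * get_multiplied_digits m
      else 0
  else
    match pvInt? str_number with                    -- int(str_number)
    | none => 0
    | some v => if v ≠ 0 then v else 1
termination_by number.toNat

-- ===== PORT B =====
-- the while loop: while n > 0: n, d = divmod(n, 10); if d: result *= d
def pvAltGo (n result : Int) : Int :=
  if h : n > 0 then
    pvAltGo (PySem.Int.floordiv n 10)
      (if PySem.Int.mod n 10 ≠ 0 then result * PySem.Int.mod n 10 else result)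
  else result
termination_by n.toNat
decreasing_by
  rw [PySem.Int.floordiv_eq_ediv_of_pos (by norm_num)]
  omega

def get_multiplied_digits_alt (number : Int) : Int := pvAltGo number 1

-- ===== PRECONDITION & SPEC =====
-- Pre_ excludes exactly the negative numbers: there str(number) starts with '-' and A's
-- int(str_number[0]) raises ValueError.
def Pre_get_multiplied_digits (number : Int) : Prop := 0 ≤ number
instance (number : Int) : Decidable (Pre_get_multiplied_digits number) := by
  unfold Pre_get_multiplied_digits; infer_instance

def pvWitness_get_multiplied_digits : Int := 1234

def Spec_get_multiplied_digits (number : Int) (out : Int) : Prop := out = get_multiplied_digits_alt number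
instance (number : Int) (out : Int) : Decidable (Spec_get_multiplied_digits number out) := by
  unfold Spec_get_multiplied_digits; infer_instance

-- ===== CLAIM (what is proved, stated in full; the proofs are below) =====
def Claim_equal_get_multiplied_digits : Prop := ∀ (number : Int), Dom_get_multiplied_digits number → Pre_get_multiplied_digits number → Spec_get_multiplied_digits number (get_multiplied_digits number)

-- ===== LEMMAS AND PROOFS =====

-- canonical decimal digit characters of a natural number (most significant first);
-- proved below to be what Nat.toDigits 10 (hence PySem.Int.toStr on nonnegatives) produces
def pvDchars (n : Nat) : List Char :=
  if _h : n < 10 then [Nat.digitChar n]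
  else pvDchars (n / 10) ++ [Nat.digitChar (n % 10)]
decreasing_by exact Nat.div_lt_self (by omega) (by omega)

theorem pvToDigitsCore_eq (fuel n : Nat) (ds : List Char) (h : n < fuel) :
    Nat.toDigitsCore 10 fuel n ds = pvDchars n ++ ds := by
  induction fuel generalizing n ds with
  | zero => omega
  | succ fuel ih =>
    rw [Nat.toDigitsCore]
    by_cases hn : n < 10
    · rw [if_pos (by omega : n / 10 = 0)]
      rw [pvDchars, dif_pos hn, Nat.mod_eq_of_lt hn]
      rfl
    · rw [if_neg (by omega : ¬ n / 10 = 0)]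
      rw [ih (n / 10) _ (by have := Nat.div_lt_self (by omega : 0 < n) (by omega : 1 < 10); omega)]
      conv_rhs => rw [pvDchars, dif_neg hn]
      simp

theorem pvToDigits_eq (n : Nat) : Nat.toDigits 10 n = pvDchars n := by
  rw [Nat.toDigits, pvToDigitsCore_eq (n + 1) n [] (by omega), List.append_nil]

theorem pvDigitChar_isDigit {d : Nat} (h : d < 10) : (Nat.digitChar d).isDigit = true := by
  interval_cases d <;> decide

theorem pvDigitChar_val {d : Nat} (h : d < 10) : (Nat.digitChar d).toNat - '0'.toNat = d := by
  interval_cases d <;> decide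

theorem pvChar_eq_of_toNat {c d : Char} (h : c.toNat = d.toNat) : c = d :=
  Char.ext (UInt32.toNat_inj.mp h)

theorem pvDigit_bounds {c : Char} (h : c.isDigit = true) : 48 ≤ c.toNat ∧ c.toNat ≤ 57 := by
  simp [Char.isDigit] at h
  exact ⟨UInt32.le_iff_toNat_le.mp h.1, UInt32.le_iff_toNat_le.mp h.2⟩

theorem pvChar_eq_ofNat {c : Char} {k : Nat} (hk : k < 55296) (h : c.toNat = k) : c = Char.ofNat k :=
  pvChar_eq_of_toNat (by rw [h, Char.toNat_ofNat, if_pos (Or.inl hk)])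

theorem pvDigit_recon {c : Char} (h : c.isDigit = true) : Nat.digitChar (c.toNat - '0'.toNat) = c := by
  have hb := pvDigit_bounds h
  have : c.toNat = 48 ∨ c.toNat = 49 ∨ c.toNat = 50 ∨ c.toNat = 51 ∨ c.toNat = 52 ∨
      c.toNat = 53 ∨ c.toNat = 54 ∨ c.toNat = 55 ∨ c.toNat = 56 ∨ c.toNat = 57 := by omega
  rcases this with h' | h' | h' | h' | h' | h' | h' | h' | h' | h' <;>
    rw [pvChar_eq_ofNat (by omega) h'] <;> decide

theorem pvDchars_ne_nil (n : Nat) : pvDchars n ≠ [] := by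
  rw [pvDchars]
  split <;> simp

theorem pvDchars_all_digit (n : Nat) : ∀ c ∈ pvDchars n, c.isDigit = true := by
  induction n using Nat.strong_induction_on with
  | _ n ih =>
    rw [pvDchars]
    split
    · next h => simpa using pvDigitChar_isDigit h
    · next h =>
      intro c hc
      rcases List.mem_append.mp hc with h1 | h1
      · exact ih (n / 10) (Nat.div_lt_self (by omega) (by omega)) c h1
      · simp at h1
        subst h1
        exact pvDigitChar_isDigit (Nat.mod_lt _ (by omega))

theorem pvVal_acc (ds : List Char) (a : Nat) :
    ds.foldl (fun a c => 10 * a + (c.toNat - '0'.toNat)) a = a * 10 ^ ds.length + pvVal ds := by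
  induction ds generalizing a with
  | nil => simp [pvVal]
  | cons c t ih =>
    simp only [List.foldl_cons, List.length_cons, pvVal]
    rw [ih (10 * a + (c.toNat - '0'.toNat)), ih (10 * 0 + (c.toNat - '0'.toNat))]
    ring

theorem pvVal_append_singleton (ds : List Char) (c : Char) :
    pvVal (ds ++ [c]) = 10 * pvVal ds + (c.toNat - '0'.toNat) := by
  simp [pvVal, List.foldl_append]

theorem pvVal_dchars (n : Nat) : pvVal (pvDchars n) = n := by
  induction n using Nat.strong_induction_on with
  | _ n ih =>
    rw [pvDchars]
    split
    · next h =>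
      simp [pvVal]
      exact pvDigitChar_val h
    · next h =>
      rw [pvVal_append_singleton, ih (n / 10) (Nat.div_lt_self (by omega) (by omega)),
        pvDigitChar_val (Nat.mod_lt _ (by omega))]
      omega

theorem pvVal_pos {ds : List Char} {c : Char} (hd : c.isDigit = true) (hc : c ≠ '0') :
    1 ≤ pvVal (c :: ds) := by
  have hb := pvDigit_bounds hd
  have h0 : c.toNat ≠ 48 := fun h => hc (pvChar_eq_of_toNat (by rw [h]; rfl))
  show 1 ≤ List.foldl _ _ _
  rw [List.foldl_cons, pvVal_acc]
  have : 1 ≤ 10 ^ ds.length := Nat.one_le_pow _ _ (by omega)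
  have : 1 ≤ 10 * 0 + (c.toNat - '0'.toNat) := by
    show 1 ≤ 10 * 0 + (c.toNat - 48)
    omega
  nlinarith

theorem pvDchars_head_ne_zero {n : Nat} (h : 1 ≤ n) :
    ∀ c rest, pvDchars n = c :: rest → c ≠ '0' := by
  induction n using Nat.strong_induction_on with
  | _ n ih =>
    intro c rest heq
    rw [pvDchars] at heq
    split at heq
    · next hlt =>
      have hc : c = Nat.digitChar n := by
        have := heq.symm
        simp at this
        exact this.1
      subst hc
      interval_cases n <;> decide
    · next hlt =>
      obtain ⟨c', rest', hsh⟩ := List.exists_cons_of_ne_nil (pvDchars_ne_nil (n / 10))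
      rw [hsh] at heq
      have hc : c' = c := by
        have := congrArg List.head? heq
        simpa using this
      rw [← hc]
      exact ih (n / 10) (Nat.div_lt_self (by omega) (by omega)) (by omega) c' rest' hsh

-- round trip: a digit string without a leading zero is the canonical repr of its value
theorem pvRT (cs : List Char) : (∀ c ∈ cs, c.isDigit = true) → cs ≠ [] →
    (∀ rest, cs ≠ '0' :: rest) → pvDchars (pvVal cs) = cs := by
  induction cs using List.reverseRecOn with
  | nil => intro _ hne _; cases hne rfl
  | append_singleton ds c ih =>
    intro hd hne h0
    have hcdig : c.isDigit = true := hd c (by simp)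
    have hcb := pvDigit_bounds hcdig
    have h48 : '0'.toNat = 48 := rfl
    cases ds with
    | nil =>
      simp only [List.nil_append]
      have hv : pvVal [c] = c.toNat - '0'.toNat := by simp [pvVal]
      rw [hv, pvDchars, dif_pos (by show c.toNat - '0'.toNat < 10; omega)]
      rw [pvDigit_recon hcdig]
    | cons c1 ds1 =>
      have hc1dig : c1.isDigit = true := hd c1 (by simp)
      have hc1z : c1 ≠ '0' := by
        intro h
        exact h0 (ds1 ++ [c]) (by rw [h]; simp)
      have hpos : 1 ≤ pvVal (c1 :: ds1) := pvVal_pos hc1dig hc1z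
      have hv : pvVal ((c1 :: ds1) ++ [c]) = 10 * pvVal (c1 :: ds1) + (c.toNat - '0'.toNat) :=
        pvVal_append_singleton _ _
      rw [hv, pvDchars, dif_neg (by omega)]
      have hdiv : (10 * pvVal (c1 :: ds1) + (c.toNat - '0'.toNat)) / 10 = pvVal (c1 :: ds1) := by
        omega
      have hmod : (10 * pvVal (c1 :: ds1) + (c.toNat - '0'.toNat)) % 10 = c.toNat - '0'.toNat := by
        omega
      rw [hdiv, hmod, pvDigit_recon hcdig,
        ih (fun x hx => hd x (by simp at hx ⊢; tauto)) (by simp) (fun rest h => hc1z (by injection h))]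

-- the fold step over digit characters that A's recursion amounts to
def pvPstep (r : Int) (c : Char) : Int :=
  if ((c.toNat - '0'.toNat : Nat) : Int) ≠ 0 then r * ((c.toNat - '0'.toNat : Nat) : Int) else r

def pvP (cs : List Char) : Int := cs.foldl pvPstep 1

theorem pvPstep_mul (a : Int) (c : Char) : pvPstep a c = a * pvPstep 1 c := by
  unfold pvPstep
  split <;> ring

theorem pvP_acc (cs : List Char) (a : Int) : cs.foldl pvPstep a = a * pvP cs := by
  induction cs generalizing a with
  | nil => simp [pvP]
  | cons c t ih =>
    show List.foldl _ (pvPstep a c) t = a * List.foldl _ (pvPstep 1 c) t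
    rw [ih (pvPstep a c), ih (pvPstep 1 c), pvPstep_mul]
    ring

theorem pvP_append_singleton (ds : List Char) (c : Char) :
    pvP (ds ++ [c]) = pvP ds * pvPstep 1 c := by
  show List.foldl _ _ _ = _
  rw [List.foldl_append]
  show pvPstep (pvP ds) c = _
  exact pvPstep_mul _ _

theorem pvPstep_digitChar {d : Nat} (h : d < 10) :
    pvPstep 1 (Nat.digitChar d) = if d ≠ 0 then (d : Int) else 1 := by
  unfold pvPstep
  rw [pvDigitChar_val h]
  by_cases hd : d = 0
  · subst hd; simp
  · rw [if_pos (by exact_mod_cast hd), if_pos hd, one_mul]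

-- product of nonzero digits is blind to leading zeros: P of the canonical repr of a digit
-- string's value is P of the digit string itself
theorem pvZ (cs : List Char) (hd : ∀ c ∈ cs, c.isDigit = true) :
    pvP (pvDchars (pvVal cs)) = pvP cs := by
  induction cs with
  | nil =>
    have h0 : pvVal [] = 0 := rfl
    rw [h0, pvDchars, dif_pos (by omega : (0 : Nat) < 10)]
    decide
  | cons c t ih =>
    by_cases hc : c = '0'
    · subst hc
      have hv : pvVal ('0' :: t) = pvVal t := by simp [pvVal]
      have hp : pvP ('0' :: t) = pvP t := by
        show List.foldl _ (pvPstep 1 '0') t = _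
        norm_num [pvPstep, pvP]
      rw [hv, hp]
      exact ih (fun x hx => hd x (by simp [hx]))
    · rw [pvRT (c :: t) hd (by simp) (fun rest h => hc (by injection h))]

theorem pvInt?_digits (cs : List Char) (hd : ∀ c ∈ cs, c.isDigit = true) (hne : cs ≠ []) :
    pvInt? cs = some ((pvVal cs : Nat) : Int) := by
  cases cs with
  | nil => cases hne rfl
  | cons c ds =>
    have hcb := pvDigit_bounds (hd c (by simp))
    have hminus : ('-' : Char).toNat = 45 := rfl
    have hplus : ('+' : Char).toNat = 43 := rfl
    have hne1 : c ≠ '-' := fun h => by rw [h, hminus] at hcb; omega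
    have hne2 : c ≠ '+' := fun h => by rw [h, hplus] at hcb; omega
    rw [pvInt?, if_neg hne1, if_neg hne2, pvDigits?,
      if_pos ⟨by simp, List.all_eq_true.mpr (fun x hx => hd x hx)⟩]
    rfl

theorem pvToChars_natCast (N : Nat) : PySem.Int.toChars (N : Int) = pvDchars N := by
  rw [PySem.Int.toChars, if_neg (by omega : ¬ ((N : Int) < 0)), Int.toNat_natCast, pvToDigits_eq]

theorem pvA_eq (N : Nat) : get_multiplied_digits (N : Int) = pvP (pvDchars N) := by
  induction N using Nat.strong_induction_on with
  | _ N ih =>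
    by_cases hN : N < 10
    · interval_cases N <;>
        · rw [get_multiplied_digits.eq_def, pvToChars_natCast, pvDchars, dif_pos (by norm_num)]
          decide
    · have h48 : '0'.toNat = 48 := rfl
      have hD' : pvDchars N = pvDchars (N / 10) ++ [Nat.digitChar (N % 10)] := by
        rw [pvDchars]
        rw [dif_neg hN]
      obtain ⟨c0, t, hsh⟩ := List.exists_cons_of_ne_nil (pvDchars_ne_nil (N / 10))
      have hD : pvDchars N = c0 :: (t ++ [Nat.digitChar (N % 10)]) := by
        rw [hD', hsh]; simp
      set rest := t ++ [Nat.digitChar (N % 10)] with hrest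
      have hdigAll : ∀ c ∈ pvDchars N, c.isDigit = true := pvDchars_all_digit N
      have hc0 : c0.isDigit = true := hdigAll c0 (by rw [hD]; simp)
      have hrdig : ∀ c ∈ rest, c.isDigit = true := fun c hcm => hdigAll c (by rw [hD]; simp [hcm])
      have hrne : rest ≠ [] := by simp [hrest]
      have hc0z : c0 ≠ '0' := pvDchars_head_ne_zero (by omega) c0 rest hD
      have hb0 := pvDigit_bounds hc0
      have hd0pos : 1 ≤ c0.toNat - '0'.toNat := by
        have : c0.toNat ≠ 48 := fun hh => hc0z (pvChar_eq_of_toNat (by rw [hh]; rfl))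
        omega
      have hvN : pvVal (c0 :: rest) = N := by rw [← hD, pvVal_dchars]
      have hsplit : pvVal (c0 :: rest) = (c0.toNat - '0'.toNat) * 10 ^ rest.length + pvVal rest := by
        show List.foldl _ (10 * 0 + (c0.toNat - '0'.toNat)) rest = _
        rw [pvVal_acc]
        simp
      have hlt : pvVal rest < N := by
        have hge : 0 < (c0.toNat - '0'.toNat) * 10 ^ rest.length :=
          Nat.mul_pos (by omega) (Nat.pow_pos (by omega : 0 < 10))
        omega
      have hg : PySem.Chars.pyGet? (c0 :: rest) 0 = some c0 := by simp [pysem]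
      have hint1 : pvInt? [c0] = some ((pvVal [c0] : Nat) : Int) := pvInt?_digits [c0] (by simpa) (by simp)
      have hv1 : pvVal [c0] = c0.toNat - '0'.toNat := by simp [pvVal]
      rw [hv1] at hint1
      have hlen : PySem.Chars.len (c0 :: rest) > 1 := by
        have : rest.length ≠ 0 := fun hh => hrne (List.eq_nil_of_length_eq_zero hh)
        simp only [PySem.Chars.len]
        simp
        omega
      have hslice : PySem.Chars.slice (c0 :: rest) (some 1) none = rest := by simp [pysem]
      have hint2 : pvInt? rest = some ((pvVal rest : Nat) : Int) := pvInt?_digits rest hrdig hrne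
      rw [get_multiplied_digits.eq_def]
      simp only [pvToChars_natCast, hD, hg, hint1, hslice, hint2, if_pos hlen,
        Int.toNat_natCast, dif_pos hlt]
      rw [ih (pvVal rest) hlt, pvZ rest hrdig]
      have hR : pvP (c0 :: rest) = pvPstep 1 c0 * pvP rest := by
        show List.foldl _ (pvPstep 1 c0) rest = _
        rw [pvP_acc]
      rw [hR]
      have hstep : pvPstep 1 c0 = ((c0.toNat - '0'.toNat : Nat) : Int) := by
        unfold pvPstep
        rw [if_pos (by exact_mod_cast (by omega : (c0.toNat - '0'.toNat : Nat) ≠ 0))]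
        try ring
      rw [hstep]

-- ===== B-side lemmas =====

theorem pvAltGo_pos (n r : Int) (h : n > 0) :
    pvAltGo n r = pvAltGo (PySem.Int.floordiv n 10)
      (if PySem.Int.mod n 10 ≠ 0 then r * PySem.Int.mod n 10 else r) := by
  rw [pvAltGo, dif_pos h]

theorem pvAltGo_nonpos (n r : Int) (h : ¬ n > 0) : pvAltGo n r = r := by
  rw [pvAltGo, dif_neg h]

theorem pvAltGo_acc (k : Nat) (n : Int) (hk : n.toNat = k) (r : Int) :
    pvAltGo n r = r * pvAltGo n 1 := by
  induction k using Nat.strong_induction_on generalizing n r with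
  | _ k ih =>
    by_cases h : n > 0
    · rw [pvAltGo_pos n r h, pvAltGo_pos n 1 h]
      have hlt : (PySem.Int.floordiv n 10).toNat < k := by
        rw [PySem.Int.floordiv_eq_ediv_of_pos (by norm_num)]
        omega
      have ihf := ih _ hlt (PySem.Int.floordiv n 10) rfl
      split_ifs with hm
      · rw [ihf]
        conv_rhs => rw [ihf]
        ring
      · rw [ihf]
    · rw [pvAltGo_nonpos n r h, pvAltGo_nonpos n 1 h]
      ring

-- cast form of one loop iteration, for a positive natural
theorem pvAltGo_nat (N : Nat) (h : 0 < N) (r : Int) :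
    pvAltGo (N : Int) r
      = pvAltGo ((N / 10 : Nat) : Int) (if (N % 10 : Nat) ≠ 0 then r * ((N % 10 : Nat) : Int) else r) := by
  rw [pvAltGo_pos _ _ (by exact_mod_cast h)]
  rw [show PySem.Int.floordiv (N : Int) 10 = ((N / 10 : Nat) : Int) from
        by exact_mod_cast PySem.Int.floordiv_natCast N 10,
      show PySem.Int.mod (N : Int) 10 = ((N % 10 : Nat) : Int) from
        by exact_mod_cast PySem.Int.mod_natCast N 10]
  congr 1
  by_cases hz : N % 10 = 0
  · simp [hz]
  · rw [if_pos (by exact_mod_cast hz), if_pos hz]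

-- B's divmod loop computes the product of the non-zero digits of the decimal expansion
theorem pvB_eq (N : Nat) : get_multiplied_digits_alt (N : Int) = pvP (pvDchars N) := by
  show pvAltGo (N : Int) 1 = pvP (pvDchars N)
  induction N using Nat.strong_induction_on with
  | _ N ih =>
    by_cases h0 : N = 0
    · subst h0
      rw [pvAltGo_nonpos _ _ (by norm_num), pvDchars, dif_pos (by norm_num)]
      decide
    · by_cases hN : N < 10
      · rw [pvAltGo_nat N (by omega) 1, Nat.div_eq_of_lt hN, Nat.mod_eq_of_lt hN,
          pvAltGo_nonpos _ _ (by norm_num), if_pos h0,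
          pvDchars, dif_pos hN, pvP, List.foldl_cons, List.foldl_nil,
          pvPstep_digitChar hN, if_pos h0]
        try ring
      · rw [pvAltGo_nat N (by omega) 1,
          pvAltGo_acc ((N / 10 : Nat) : Int).toNat _ rfl,
          ih (N / 10) (Nat.div_lt_self (by omega) (by omega))]
        conv_rhs => rw [pvDchars, dif_neg hN]
        rw [pvP_append_singleton, pvPstep_digitChar (Nat.mod_lt _ (by omega))]
        split_ifs <;> ring

-- ===== VERDICT (by name: the statement is the Claim_ definition above) =====
theorem get_multiplied_digits_spec : Claim_equal_get_multiplied_digits := by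
  intro number _hDom hPre
  unfold Spec_get_multiplied_digits
  have h : number = ((number.toNat : Nat) : Int) := (Int.toNat_of_nonneg hPre).symm
  rw [h, pvA_eq, pvB_eq]
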